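-- pv_equiv track=rewrite | github.com/olivervalmas/ADS-Coursework-2018 | Q2/non-recursive test.py | is_ephemeral
-- ===== SOURCE A (Python) =====
-- def get_k_child(n, k):
--
--     total = 0
--
--     for digit in repr(n):
--         total += int(digit)**k
--
--     return total
--
-- def is_ephemeral(n, k):
--
--     sequence = [n]
--
--     while n != 1:
--         n = get_k_child(n,k)
--         if n in sequence:
--             sequence.append(n)
--             break
--         sequence.append(n)
--
--     return sequence[-1] == 1
-- ===== SOURCE B (Python) =====
-- def get_k_child(n, k):
--
--     total = 0
--
--     for digit in repr(n):
--         total += int(digit)**k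
--
--     return total
--
--
-- def is_ephemeral(n, k):
--     # Floyd's tortoise-and-hare cycle detection: constant space, no
--     # growing visited list with linear membership scans.
--     slow = fast = n
--     while True:
--         slow = get_k_child(slow, k)
--         if slow == 1:
--             return True
--         fast = get_k_child(get_k_child(fast, k), k)
--         if fast == 1:
--             return True
--         if slow == fast:
--             return False
-- ===== Notes on version B (the rewrite author's own statement) =====
-- stated objective: alternative
-- what changed: Replaced the growing visited-list (appending every value and doing a linear 'n in sequence' scan each step) by Floyd's tortoise-and-hare cycle detection: two constant-space pointers advanced at speeds 1 and 2, returning True when either hits the fixed point 1 and False when they meet.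
-- outside the precondition, e.g. on is_ephemeral(-3, 2): A raises ValueError, B raises ValueError; on is_ephemeral(22, -1): A returns True, B returns True
import Mathlib
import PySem

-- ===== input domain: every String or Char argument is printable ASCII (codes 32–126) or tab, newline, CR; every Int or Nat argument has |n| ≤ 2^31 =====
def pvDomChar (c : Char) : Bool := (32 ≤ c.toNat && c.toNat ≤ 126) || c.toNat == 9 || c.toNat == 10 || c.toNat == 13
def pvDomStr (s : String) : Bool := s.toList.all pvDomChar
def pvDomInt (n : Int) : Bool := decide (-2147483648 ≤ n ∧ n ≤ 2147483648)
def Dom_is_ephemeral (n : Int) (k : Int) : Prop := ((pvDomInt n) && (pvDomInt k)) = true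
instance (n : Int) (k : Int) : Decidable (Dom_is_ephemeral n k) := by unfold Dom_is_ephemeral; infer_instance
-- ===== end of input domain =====

-- B replaces A's growing visited-list (a linear membership scan per step) by Floyd's
-- two-pointer cycle detection in constant space (objective: alternative, not claimed faster).
-- Both while-loops are totalized by the same doubling-fuel harness pvRun (a fuel guard,
-- not part of either algorithm): fuel 2^a for a = 0, 1, …, eExp, where 2^eExp is proved
-- below to exceed every possible iteration count, so the `none` fallbacks are never reached.

-- shared helpers (used by both ports)

-- get_k_child: `for digit in repr(n): total += int(digit)**k`.  `int(digit)` is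
-- PySem.Int.ofChars? on the one-character string; `.getD 0` and `k.toNat` only totalize
-- the '-'-digit / negative-k cases, which Pre_is_ephemeral excludes (Python raises there).
def get_k_child (n : Int) (k : Int) : Int :=
  (PySem.Int.toChars n).foldl (fun total digit => total + ((PySem.Int.ofChars? [digit]).getD 0) ^ k.toNat) 0

-- run one loop step at a time with the given fuel; none = fuel exhausted
def pvIter {S R : Type} : Nat → (S → Sum S R) → S → Option R
  | 0, _, _ => none
  | fuel + 1, f, s =>
    match f s with
    | .inr r => some r
    | .inl s' => pvIter fuel f s'

-- retry with fuel 2^a, 2^(a+1), … (att attempts): lazy totalization — the huge worst-case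
-- bound 2^(a+att-1) is never materialized unless the loop actually runs that long
def pvRun {S R : Type} : Nat → Nat → (S → Sum S R) → S → Option R
  | 0, _, _, _ => none
  | att + 1, a, f, s =>
    match pvIter (2 ^ a) f s with
    | some r => some r
    | none => pvRun att (a + 1) f s

-- exponent of the fuel bound: 2^(eExp n k) exceeds the pigeonhole bound on loop length
def eExp (n : Int) (k : Int) : Nat := 4 * (2 * k.toNat + 4 + (PySem.Int.toChars n).length) + 1

-- ===== PORT A =====

-- one iteration of A's `while n != 1` loop over the state (sequence, n); `.inr` = loop exit
-- with the final sequence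
def stepA (k : Int) (sc : List Int × Int) : Sum (List Int × Int) (List Int) :=
  if sc.2 = 1 then .inr sc.1
  else if get_k_child sc.2 k ∈ sc.1 then .inr (sc.1 ++ [get_k_child sc.2 k])
  else .inl (sc.1 ++ [get_k_child sc.2 k], get_k_child sc.2 k)

def is_ephemeral (n : Int) (k : Int) : Bool :=
  match pvRun (eExp n k + 1) 0 (stepA k) ([n], n) with
  | some seq => PySem.List.pyGet? seq (-1) == some 1
  | none => false

-- ===== PORT B =====

-- one iteration of B's `while True` loop over the two pointers (slow, fast): advance slow
-- once and fast twice; `.inr true` on hitting 1, `.inr false` when the pointers meet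
def stepB (k : Int) (sf : Int × Int) : Sum (Int × Int) Bool :=
  if get_k_child sf.1 k = 1 then .inr true
  else if get_k_child (get_k_child sf.2 k) k = 1 then .inr true
  else if get_k_child sf.1 k = get_k_child (get_k_child sf.2 k) k then .inr false
  else .inl (get_k_child sf.1 k, get_k_child (get_k_child sf.2 k) k)

def is_ephemeral_alt (n : Int) (k : Int) : Bool :=
  (pvRun (eExp n k + 1) 0 (stepB k) (n, n)).getD false

-- ===== PRECONDITION & SPEC =====
-- Pre_ excludes negative n (Python's int('-') raises ValueError) and negative k with n ≠ 1
-- (digit**k is then a float, so the digit sum is a float whose repr generally fails to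
-- re-parse as int on the next step — both programs raise, except for rare float
-- coincidences such as (22, -1), where both A and B return True); n = 1 is kept for every
-- k since both programs return True there.
def Pre_is_ephemeral (n : Int) (k : Int) : Prop := (0 ≤ n ∧ 0 ≤ k) ∨ n = 1
instance (n : Int) (k : Int) : Decidable (Pre_is_ephemeral n k) := by unfold Pre_is_ephemeral; infer_instance
def pvWitness_is_ephemeral : Int × Int := (7, 2)

def Spec_is_ephemeral (n : Int) (k : Int) (out : Bool) : Prop := out = is_ephemeral_alt n k
instance (n : Int) (k : Int) (out : Bool) : Decidable (Spec_is_ephemeral n k out) := by unfold Spec_is_ephemeral; infer_instance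

-- ===== CLAIM (what is proved, stated in full; the proofs are below) =====
def Claim_equal_is_ephemeral : Prop := ∀ (n : Int) (k : Int), Dom_is_ephemeral n k → Pre_is_ephemeral n k → Spec_is_ephemeral n k (is_ephemeral n k)

-- ===== LEMMAS AND PROOFS =====

lemma toDigitsCore_chars : ∀ (f m : Nat) (l : List Char) (c : Char),
    c ∈ Nat.toDigitsCore 10 f m l → c ∈ l ∨ ∃ d : Nat, d < 10 ∧ c = Nat.digitChar d := by
  intro f
  induction f with
  | zero => intro m l c h; exact Or.inl h
  | succ f ih =>
    intro m l c h
    simp only [Nat.toDigitsCore] at h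
    by_cases h0 : m / 10 = 0
    · rw [if_pos h0] at h
      rcases List.mem_cons.mp h with h | h
      · exact Or.inr ⟨m % 10, Nat.mod_lt _ (by norm_num), h⟩
      · exact Or.inl h
    · rw [if_neg h0] at h
      rcases ih _ _ _ h with h | h
      · rcases List.mem_cons.mp h with h | h
        · exact Or.inr ⟨m % 10, Nat.mod_lt _ (by norm_num), h⟩
        · exact Or.inl h
      · exact Or.inr h

-- every character of str(n) parses (via `.getD 0`) to a value in [0, 9]
lemma digitVal_bounds (x : Int) (c : Char) (hc : c ∈ PySem.Int.toChars x) :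
    0 ≤ (PySem.Int.ofChars? [c]).getD 0 ∧ (PySem.Int.ofChars? [c]).getD 0 ≤ 9 := by
  have hdig : ∀ d : Nat, d < 10 →
      0 ≤ (PySem.Int.ofChars? [Nat.digitChar d]).getD 0 ∧
      (PySem.Int.ofChars? [Nat.digitChar d]).getD 0 ≤ 9 := by
    intro d hd; interval_cases d <;> decide
  simp only [PySem.Int.toChars] at hc
  by_cases hx : x < 0
  · rw [if_pos hx] at hc
    rcases List.mem_cons.mp hc with h | h
    · subst h; decide
    · rcases toDigitsCore_chars _ _ _ _ h with h | ⟨d, hd, rfl⟩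
      · simp at h
      · exact hdig d hd
  · rw [if_neg hx] at hc
    rcases toDigitsCore_chars _ _ _ _ hc with h | ⟨d, hd, rfl⟩
    · simp at h
    · exact hdig d hd

lemma child_foldl_bounds (K : Nat) : ∀ (l : List Char) (a : Int),
    (∀ c ∈ l, 0 ≤ (PySem.Int.ofChars? [c]).getD 0 ∧ (PySem.Int.ofChars? [c]).getD 0 ≤ 9) →
    a ≤ l.foldl (fun total digit => total + ((PySem.Int.ofChars? [digit]).getD 0) ^ K) a ∧
    l.foldl (fun total digit => total + ((PySem.Int.ofChars? [digit]).getD 0) ^ K) a ≤ a + 9 ^ K * l.length := by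
  intro l
  induction l with
  | nil => intro a _; simp
  | cons c l ih =>
    intro a h
    have hc := h c (List.mem_cons_self ..)
    have hrest : ∀ c' ∈ l, 0 ≤ (PySem.Int.ofChars? [c']).getD 0 ∧ (PySem.Int.ofChars? [c']).getD 0 ≤ 9 :=
      fun c' hc' => h c' (List.mem_cons_of_mem _ hc')
    have h0 : (0:Int) ≤ ((PySem.Int.ofChars? [c]).getD 0) ^ K := pow_nonneg hc.1 K
    have h9 : ((PySem.Int.ofChars? [c]).getD 0) ^ K ≤ 9 ^ K := pow_le_pow_left₀ hc.1 hc.2 K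
    have := ih (a + ((PySem.Int.ofChars? [c]).getD 0) ^ K) hrest
    simp only [List.foldl_cons, List.length_cons]
    push_cast
    constructor
    · linarith [this.1]
    · have h2 := this.2
      have h3 : (0:Int) ≤ 9 ^ K := by positivity
      nlinarith [h2]

lemma child_nonneg (n k : Int) : 0 ≤ get_k_child n k :=
  (child_foldl_bounds k.toNat (PySem.Int.toChars n) 0 (fun c hc => digitVal_bounds n c hc)).1

lemma child_le (n k : Int) : get_k_child n k ≤ 9 ^ k.toNat * ((PySem.Int.toChars n).length : Int) := by
  have := (child_foldl_bounds k.toNat (PySem.Int.toChars n) 0 (fun c hc => digitVal_bounds n c hc)).2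
  simpa using this

lemma key_ineq (K L : Nat) : 9 ^ K * (2 * K + 4 + L) < 10 ^ (2 * K + 4 + L) := by
  have hK : K < 2 ^ K := Nat.lt_two_pow_self
  have hL : L < 2 ^ L := Nat.lt_two_pow_self
  have h1 : 2 * K + 4 + L < 16 * (2 ^ K * 2 ^ L) := by nlinarith
  have h2 : 9 ^ K * (2 * K + 4 + L) < 9 ^ K * (16 * (2 ^ K * 2 ^ L)) :=
    mul_lt_mul_of_pos_left h1 (pow_pos (by norm_num) K)
  have h3 : 9 ^ K * (16 * (2 ^ K * 2 ^ L)) ≤ 10 ^ K * (10 ^ 4 * (10 ^ K * 10 ^ L)) := by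
    have e9 : (9:Nat) ^ K ≤ 10 ^ K := Nat.pow_le_pow_left (by norm_num) K
    have e2 : (2:Nat) ^ K ≤ 10 ^ K := Nat.pow_le_pow_left (by norm_num) K
    have e2' : (2:Nat) ^ L ≤ 10 ^ L := Nat.pow_le_pow_left (by norm_num) L
    have e16 : (16:Nat) ≤ 10 ^ 4 := by norm_num
    exact Nat.mul_le_mul e9 (Nat.mul_le_mul e16 (Nat.mul_le_mul e2 e2'))
  have h4 : 10 ^ K * (10 ^ 4 * (10 ^ K * 10 ^ L)) = 10 ^ (2 * K + 4 + L) := by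
    rw [← pow_add, ← pow_add, ← pow_add]; congr 1; omega
  omega

-- a finite set closed under `get_k_child · k` in which every loop value lives
def ephN (n k : Int) : Nat := 10 ^ (2 * k.toNat + 4 + (PySem.Int.toChars n).length)

def ephSet (n k : Int) : Finset Int :=
  insert n ((Finset.range (ephN n k)).image (fun j : Nat => (j : Int)))

lemma mem_ephSet_iff (n k x : Int) : x ∈ ephSet n k ↔ x = n ∨ (0 ≤ x ∧ x < (ephN n k : Int)) := by
  simp only [ephSet, Finset.mem_insert, Finset.mem_image, Finset.mem_range]
  apply or_congr_right
  constructor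
  · rintro ⟨a, ha, rfl⟩
    constructor
    · exact Int.natCast_nonneg a
    · exact_mod_cast ha
  · intro ⟨h0, h1⟩; exact ⟨x.toNat, by omega, by omega⟩

lemma ephSet_card_le (n k : Int) : (ephSet n k).card ≤ ephN n k + 1 := by
  have h1 : (ephSet n k).card ≤ ((Finset.range (ephN n k)).image (fun j : Nat => (j : Int))).card + 1 :=
    Finset.card_insert_le _ _
  have h2 : ((Finset.range (ephN n k)).image (fun j : Nat => (j : Int))).card ≤ ephN n k := by
    calc ((Finset.range (ephN n k)).image (fun j : Nat => (j : Int))).card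
        ≤ (Finset.range (ephN n k)).card := Finset.card_image_le
      _ = ephN n k := Finset.card_range _
  omega

-- strict gap: 10^M + 4 ≤ 16^M for M ≥ 4
lemma pow_gap (M : Nat) (h : 4 ≤ M) : 10 ^ M + 4 ≤ 16 ^ M := by
  obtain ⟨m, rfl⟩ : ∃ m, M = m + 4 := ⟨M - 4, by omega⟩
  have h1 : (10:Nat) ^ m ≤ 16 ^ m := Nat.pow_le_pow_left (by norm_num) m
  have h2 : (1:Nat) ≤ 10 ^ m := Nat.one_le_pow _ _ (by norm_num)
  have e1 : (10:Nat) ^ (m + 4) = 10 ^ m * 10000 := by ring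
  have e2 : (16:Nat) ^ (m + 4) = 16 ^ m * 65536 := by ring
  nlinarith

-- the fuel exponent dominates twice the pigeonhole bound: 2·10^M + 4 ≤ 2^(4M+1)
lemma ephN2_le_pow (n k : Int) : 2 * ephN n k + 4 ≤ 2 ^ eExp n k := by
  unfold ephN eExp
  set M := 2 * k.toNat + 4 + (PySem.Int.toChars n).length with hM
  have hM4 : 4 ≤ M := by omega
  have hgap := pow_gap M hM4
  have h7 : 2 * (16:Nat) ^ M = 2 ^ (4 * M + 1) := by
    rw [show (16:Nat) = 2 ^ 4 from rfl, ← pow_mul, pow_succ]; ring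
  omega

-- the fuel exponent dominates the pigeonhole bound: 10^M + 2 ≤ 2^(4M+1)
lemma ephN_lt_pow (n k : Int) : ephN n k + 2 ≤ 2 ^ eExp n k := by
  have := ephN2_le_pow n k
  omega

lemma child_lt_ephN (n k x : Int) (hx : x ∈ ephSet n k) : get_k_child x k < (ephN n k : Int) := by
  have hkey : ((9:Int)) ^ k.toNat * ((2 * k.toNat + 4 + (PySem.Int.toChars n).length : Nat) : Int) < (ephN n k : Int) := by
    unfold ephN; exact_mod_cast key_ineq k.toNat (PySem.Int.toChars n).length
  have h9 : (0:Int) ≤ 9 ^ k.toNat := by positivity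
  rcases (mem_ephSet_iff n k x).mp hx with rfl | ⟨h0, h1⟩
  · have h1 := child_le x k
    have h2 : ((PySem.Int.toChars x).length : Int) ≤ ((2 * k.toNat + 4 + (PySem.Int.toChars x).length : Nat) : Int) := by
      push_cast; omega
    have h3 := mul_le_mul_of_nonneg_left h2 h9
    linarith
  · -- 0 ≤ x < 10^E, so str(x) has at most E digits
    have hxE : x.toNat < 10 ^ (2 * k.toNat + 4 + (PySem.Int.toChars n).length) := by
      unfold ephN at h1; omega
    have hlen : (PySem.Int.toChars x).length ≤ 2 * k.toNat + 4 + (PySem.Int.toChars n).length := by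
      have hx' : ¬ x < 0 := by omega
      simp only [PySem.Int.toChars, if_neg hx']
      exact Nat.toDigits_length 10 x.toNat _ (by omega) hxE
    have h2 : ((PySem.Int.toChars x).length : Int) ≤ ((2 * k.toNat + 4 + (PySem.Int.toChars n).length : Nat) : Int) := by
      exact_mod_cast hlen
    have h3 := mul_le_mul_of_nonneg_left h2 h9
    have h4 := child_le x k
    linarith

lemma child_mem_ephSet (n k x : Int) (hx : x ∈ ephSet n k) : get_k_child x k ∈ ephSet n k :=
  (mem_ephSet_iff n k _).mpr (Or.inr ⟨child_nonneg x k, child_lt_ephN n k x hx⟩)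

lemma nodup_len_le (S : Finset Int) (l : List Int) (h1 : l.Nodup) (h2 : ∀ x ∈ l, x ∈ S) :
    l.length ≤ S.card := by
  have hc := List.toFinset_card_of_nodup h1
  have hsub : l.toFinset ⊆ S := fun x hx => h2 x (List.mem_toFinset.mp hx)
  have := Finset.card_le_card hsub
  omega

-- the deterministic orbit n, f n, f (f n), … of the digit-power map
def orbit (n k : Int) (j : Nat) : Int := (fun x => get_k_child x k)^[j] n

lemma orbit_succ (n k : Int) (j : Nat) : orbit n k (j + 1) = get_k_child (orbit n k j) k :=
  Function.iterate_succ_apply' _ j n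

lemma orbit_mem (n k : Int) : ∀ j, orbit n k j ∈ ephSet n k := by
  intro j
  induction j with
  | zero => exact Finset.mem_insert_self n _
  | succ j ih => rw [orbit_succ]; exact child_mem_ephSet n k _ ih

lemma orbit_shift_period (n k : Int) (a p : Nat) (h : orbit n k (a + p) = orbit n k a) (t : Nat) :
    orbit n k (a + t + p) = orbit n k (a + t) := by
  have h1 : ∀ s : Nat, orbit n k (t + s) = (fun x => get_k_child x k)^[t] (orbit n k s) :=
    fun s => Function.iterate_add_apply _ t s n
  have e1 : a + t + p = t + (a + p) := by omega
  have e2 : a + t = t + a := by omega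
  rw [e1, h1, e2, h1, h]

lemma orbit_period (n k : Int) (a p : Nat) (h : orbit n k (a + p) = orbit n k a) :
    ∀ (s : Nat), a ≤ s → ∀ m, orbit n k (s + m * p) = orbit n k s := by
  intro s hs m
  induction m with
  | zero => simp
  | succ m ih =>
    have h1 : orbit n k (a + (s - a + m * p) + p) = orbit n k (a + (s - a + m * p)) :=
      orbit_shift_period n k a p h (s - a + m * p)
    have e1 : a + (s - a + m * p) + p = s + (m + 1) * p := by
      have : (m + 1) * p = m * p + p := by ring
      omega
    have e2 : a + (s - a + m * p) = s + m * p := by omega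
    rw [e1, e2] at h1
    rw [h1, ih]

-- pigeonhole: some j ≥ 1 bounded by 2·|ephSet|+1 has orbit j = orbit 2j
lemma floyd_meet (n k : Int) :
    ∃ j, 1 ≤ j ∧ j ≤ 2 * (ephSet n k).card + 1 ∧ orbit n k j = orbit n k (2 * j) := by
  have hc : 0 < (ephSet n k).card := Finset.card_pos.mpr ⟨n, Finset.mem_insert_self n _⟩
  have hcard : (ephSet n k).card < (Finset.range ((ephSet n k).card + 1)).card := by
    simp
  have hmaps : Set.MapsTo (orbit n k) ↑(Finset.range ((ephSet n k).card + 1)) ↑(ephSet n k) :=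
    fun j _ => orbit_mem n k j
  obtain ⟨a0, ha0, b0, hb0, hne, heq0⟩ :=
    Finset.exists_ne_map_eq_of_card_lt_of_maps_to hcard hmaps
  simp only [Finset.mem_range] at ha0 hb0
  obtain ⟨a, b, hab, hbc, heq⟩ :
      ∃ a b : Nat, a < b ∧ b ≤ (ephSet n k).card ∧ orbit n k b = orbit n k a := by
    rcases Nat.lt_or_ge a0 b0 with h | h
    · exact ⟨a0, b0, h, by omega, heq0.symm⟩
    · exact ⟨b0, a0, by omega, by omega, heq0⟩
  have hp : 0 < b - a := by omega
  have hper : orbit n k (a + (b - a)) = orbit n k a := by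
    rw [show a + (b - a) = b from by omega]; exact heq
  have hdm := Nat.div_add_mod (max a 1 + (b - a) - 1) (b - a)
  have hr : (max a 1 + (b - a) - 1) % (b - a) < b - a := Nat.mod_lt _ hp
  refine ⟨(b - a) * ((max a 1 + (b - a) - 1) / (b - a)), by omega, by omega, ?_⟩
  have hja : a ≤ (b - a) * ((max a 1 + (b - a) - 1) / (b - a)) := by omega
  have h2 := orbit_period n k a (b - a) hper
    ((b - a) * ((max a 1 + (b - a) - 1) / (b - a))) hja
    ((max a 1 + (b - a) - 1) / (b - a))
  rw [show (b - a) * ((max a 1 + (b - a) - 1) / (b - a)) +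
        ((max a 1 + (b - a) - 1) / (b - a)) * (b - a) =
        2 * ((b - a) * ((max a 1 + (b - a) - 1) / (b - a))) from by ring] at h2
  exact h2.symm

lemma child_one (k : Int) : get_k_child 1 k = 1 := by
  have h1 : PySem.Int.toChars 1 = ['1'] := by decide
  have h2 : (PySem.Int.ofChars? ['1']).getD 0 = 1 := by decide
  simp [get_k_child, h1, h2]

-- 1 is a fixed point: once the orbit is 1 it stays 1
lemma orbit_stick (n k : Int) (j : Nat) (h : orbit n k j = 1) :
    ∀ t, j ≤ t → orbit n k t = 1 := by
  intro t ht
  induction t, ht using Nat.le_induction with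
  | base => exact h
  | succ t ht ih => rw [orbit_succ, ih, child_one]

-- sequence[-1] of a nonempty list
lemma pyGet_append_last (l : List Int) (m : Int) :
    PySem.List.pyGet? (l ++ [m]) (-1) = some m := by
  have h1 : PySem.List.pyIdx? (l.length + 1) (-1) = some l.length := by
    simp [PySem.List.pyIdx?]
  simp [PySem.List.pyGet?, h1]

-- once the orbit repeats, every value equals some value with index ≤ a + p
lemma orbit_bounded (n k : Int) (a p : Nat) (hp : 0 < p)
    (h : orbit n k (a + p) = orbit n k a) :
    ∀ t, ∃ t', t' ≤ a + p ∧ orbit n k t = orbit n k t' := by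
  intro t
  induction t using Nat.strong_induction_on with
  | _ t ih =>
    by_cases h' : t ≤ a + p
    · exact ⟨t, h', rfl⟩
    · have h1 : orbit n k (a + (t - p - a) + p) = orbit n k (a + (t - p - a)) :=
        orbit_shift_period n k a p h (t - p - a)
      rw [show a + (t - p - a) + p = t from by omega,
          show a + (t - p - a) = t - p from by omega] at h1
      obtain ⟨t', ht', he⟩ := ih (t - p) (by omega)
      exact ⟨t', ht', by rw [h1, he]⟩

-- the fuel harness: success is monotone in fuel, and pvRun returns any fuel-t success
lemma pvIter_mono {S R : Type} : ∀ (t t' : Nat) (f : S → Sum S R) (s : S) (r : R),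
    pvIter t f s = some r → t ≤ t' → pvIter t' f s = some r := by
  intro t
  induction t with
  | zero => intro t' f s r h; simp [pvIter] at h
  | succ t ih =>
    intro t' f s r h htt
    obtain ⟨t'', rfl⟩ : ∃ t'', t' = t'' + 1 := ⟨t' - 1, by omega⟩
    simp only [pvIter] at h ⊢
    cases hf : f s with
    | inr r' => rw [hf] at h; exact h
    | inl s' =>
      rw [hf] at h
      exact ih t'' f s' r h (by omega)

lemma pvRun_eq {S R : Type} : ∀ (att a : Nat) (f : S → Sum S R) (s : S) (r : R),
    pvIter (2 ^ (a + att)) f s = some r → pvRun (att + 1) a f s = some r := by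
  intro att
  induction att with
  | zero =>
    intro a f s r h
    rw [Nat.add_zero] at h
    simp [pvRun, h]
  | succ att ih =>
    intro a f s r h
    simp only [pvRun]
    cases hI : pvIter (2 ^ a) f s with
    | some r' =>
      have h2 : pvIter (2 ^ (a + (att + 1))) f s = some r' :=
        pvIter_mono _ _ f s r' hI (Nat.pow_le_pow_right (by norm_num) (by omega))
      rw [h2] at h
      simpa using h
    | none =>
      exact ih (a + 1) f s r (by rw [show a + 1 + att = a + (att + 1) from by omega]; exact h)

-- characterization of A's loop: with enough fuel and the loop invariants it returns a
-- sequence whose last element is 1 iff the orbit reaches 1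
lemma stepA_spec (n k : Int) : ∀ (fuel : Nat) (i : Nat) (seq : List Int) (cur : Int),
    (ephSet n k).card + 1 ≤ fuel + seq.length →
    seq.Nodup → (∀ x ∈ seq, x ∈ ephSet n k) →
    seq = (List.range (i + 1)).map (orbit n k) → cur = orbit n k i → (1 ∈ seq → cur = 1) →
    ∃ res, pvIter fuel (stepA k) (seq, cur) = some res ∧
      ((PySem.List.pyGet? res (-1) = some 1) ↔ ∃ j, orbit n k j = 1) := by
  intro fuel
  induction fuel with
  | zero =>
    intro i seq cur hfuel hnd hsub _ _ _
    exact absurd (nodup_len_le (ephSet n k) seq hnd hsub) (by omega)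
  | succ fuel ih =>
    intro i seq cur hfuel hnd hsub hseq hci hone
    by_cases h1 : cur = 1
    · have hstep : stepA k (seq, cur) = .inr seq := by simp [stepA, h1]
      refine ⟨seq, by simp [pvIter, hstep], ?_⟩
      have hsplit : seq = (List.range i).map (orbit n k) ++ [orbit n k i] := by
        rw [hseq, List.range_succ, List.map_append]; rfl
      rw [hsplit, pyGet_append_last]
      have horb : orbit n k i = 1 := by rw [← hci]; exact h1
      rw [horb]
      exact iff_of_true rfl ⟨i, horb⟩
    · by_cases hm : get_k_child cur k ∈ seq
      · have hstep : stepA k (seq, cur) = .inr (seq ++ [get_k_child cur k]) := by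
          simp [stepA, h1, hm]
        refine ⟨seq ++ [get_k_child cur k], by simp [pvIter, hstep], ?_⟩
        rw [pyGet_append_last]
        have hm1 : get_k_child cur k ≠ 1 := by
          intro he
          exact h1 (hone (by rw [← he]; exact hm))
        simp only [Option.some.injEq]
        constructor
        · intro he; exact absurd he hm1
        · rintro ⟨j, hj⟩
          exfalso
          -- the orbit is trapped in a cycle among indices ≤ i+1, none of which is 1
          have hmi : get_k_child cur k = orbit n k (i + 1) := by rw [orbit_succ, ← hci]
          have hm' : get_k_child cur k ∈ (List.range (i + 1)).map (orbit n k) := hseq ▸ hm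
          obtain ⟨j0, hj0r, hj0⟩ := List.mem_map.mp hm'
          have hj0i : j0 < i + 1 := List.mem_range.mp hj0r
          have hcyc : orbit n k (j0 + (i + 1 - j0)) = orbit n k j0 := by
            rw [show j0 + (i + 1 - j0) = i + 1 from by omega, ← hmi, ← hj0]
          obtain ⟨t', ht', he⟩ := orbit_bounded n k j0 (i + 1 - j0) (by omega) hcyc j
          rw [show j0 + (i + 1 - j0) = i + 1 from by omega] at ht'
          have ht1 : orbit n k t' = 1 := by rw [← he, hj]
          rcases Nat.lt_or_ge t' (i + 1) with h' | h'
          · exact h1 (hone (by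
              rw [hseq]
              exact List.mem_map.mpr ⟨t', List.mem_range.mpr h', ht1⟩))
          · have : t' = i + 1 := by omega
            subst this
            exact hm1 (by rw [hmi, ht1])
      · have hstep : stepA k (seq, cur) = .inl (seq ++ [get_k_child cur k], get_k_child cur k) := by
          simp [stepA, h1, hm]
        have hrec := ih (i + 1) (seq ++ [get_k_child cur k]) (get_k_child cur k)
          (by simp only [List.length_append, List.length_singleton]; omega)
          (by rw [List.nodup_append]
              refine ⟨hnd, List.nodup_singleton _, ?_⟩
              intro a ha b hb heq
              rw [heq, List.mem_singleton.mp hb] at ha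
              exact hm ha)
          (by intro x hx
              rcases List.mem_append.mp hx with h' | h'
              · exact hsub x h'
              · simp only [List.mem_singleton] at h'
                subst h'
                refine child_mem_ephSet n k cur ?_
                rw [hci]; exact orbit_mem n k i)
          (by rw [List.range_succ, List.map_append, ← hseq, hci, ← orbit_succ]; rfl)
          (by rw [orbit_succ, ← hci])
          (by intro hmem
              rcases List.mem_append.mp hmem with h' | h'
              · exact absurd (hone h') h1
              · simp only [List.mem_singleton] at h'
                exact h'.symm)
        obtain ⟨res, hres, hiff⟩ := hrec
        exact ⟨res, by simp [pvIter, hstep, hres], hiff⟩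

lemma A_iff (n k : Int) : is_ephemeral n k = true ↔ ∃ j, orbit n k j = 1 := by
  unfold is_ephemeral
  have hcard : (ephSet n k).card ≤ ephN n k + 1 := ephSet_card_le n k
  have hpow := ephN_lt_pow n k
  obtain ⟨res, hres, hiff⟩ := stepA_spec n k (2 ^ eExp n k) 0 [n] n
    (by simp only [List.length_singleton]; omega)
    (List.nodup_singleton n)
    (by intro x hx; simp only [List.mem_singleton] at hx; rw [hx]; exact Finset.mem_insert_self n _)
    (by rw [List.range_one]; rfl) rfl (fun h => (List.mem_singleton.mp h).symm)
  have hrun : pvRun (eExp n k + 1) 0 (stepA k) ([n], n) = some res :=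
    pvRun_eq (eExp n k) 0 (stepA k) ([n], n) res (by rw [Nat.zero_add]; exact hres)
  rw [hrun]
  rw [beq_iff_eq]
  exact hiff

-- characterization of B's loop: with enough fuel, pointers on the orbit and no earlier
-- exit, it returns true iff the orbit reaches 1
lemma stepB_spec (n k : Int) : ∀ (fuel : Nat) (i : Nat) (slow fast : Int),
    2 * (ephSet n k).card + 2 ≤ fuel + i →
    slow = orbit n k i → fast = orbit n k (2 * i) →
    (∀ j, 1 ≤ j → j ≤ i →
      orbit n k j ≠ 1 ∧ orbit n k (2 * j) ≠ 1 ∧ orbit n k j ≠ orbit n k (2 * j)) →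
    ∃ res, pvIter fuel (stepB k) (slow, fast) = some res ∧
      (res = true ↔ ∃ j, orbit n k j = 1) := by
  intro fuel
  induction fuel with
  | zero =>
    intro i slow fast hfuel _ _ hhist
    exfalso
    obtain ⟨j, hj1, hj2, hj3⟩ := floyd_meet n k
    exact (hhist j hj1 (by omega)).2.2 hj3
  | succ fuel ih =>
    intro i slow fast hfuel hs hf hhist
    have e1 : orbit n k (i + 1) = get_k_child slow k := by rw [orbit_succ, ← hs]
    have e2 : orbit n k (2 * (i + 1)) = get_k_child (get_k_child fast k) k := by
      rw [show 2 * (i + 1) = 2 * i + 1 + 1 from by omega, orbit_succ, orbit_succ, ← hf]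
    by_cases hs1 : get_k_child slow k = 1
    · have hstep : stepB k (slow, fast) = .inr true := by simp [stepB, hs1]
      exact ⟨true, by simp [pvIter, hstep], iff_of_true rfl ⟨i + 1, by rw [e1, hs1]⟩⟩
    · by_cases hf1 : get_k_child (get_k_child fast k) k = 1
      · have hstep : stepB k (slow, fast) = .inr true := by simp [stepB, hs1, hf1]
        exact ⟨true, by simp [pvIter, hstep], iff_of_true rfl ⟨2 * (i + 1), by rw [e2, hf1]⟩⟩
      · by_cases hsf : get_k_child slow k = get_k_child (get_k_child fast k) k
        · have hstep : stepB k (slow, fast) = .inr false := by simp [stepB, hf1, hsf]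
          refine ⟨false, by simp [pvIter, hstep], iff_of_false (by simp) ?_⟩
          rintro ⟨j, hj⟩
          -- the orbit is periodic from i+1 with period i+1 and never hits the fixed point 1
          have hper : orbit n k ((i + 1) + (i + 1)) = orbit n k (i + 1) := by
            rw [show (i + 1) + (i + 1) = 2 * (i + 1) from by omega, e1, e2, hsf]
          have h2 := orbit_period n k (i + 1) (i + 1) hper (i + 1) le_rfl j
          have h3 : orbit n k ((i + 1) + j * (i + 1)) = 1 :=
            orbit_stick n k j hj _ (by nlinarith)
          rw [h2] at h3
          rw [e1] at h3
          exact hs1 h3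
        · have hstep : stepB k (slow, fast) =
              .inl (get_k_child slow k, get_k_child (get_k_child fast k) k) := by
            simp [stepB, hs1, hf1, hsf]
          have hrec := ih (i + 1) (get_k_child slow k) (get_k_child (get_k_child fast k) k)
            (by omega) e1.symm e2.symm
            (by intro j hj1 hj2
                rcases Nat.lt_or_ge j (i + 1) with h' | h'
                · exact hhist j hj1 (by omega)
                · have hji : j = i + 1 := by omega
                  subst hji
                  exact ⟨by rw [e1]; exact hs1, by rw [e2]; exact hf1, by rw [e1, e2]; exact hsf⟩)
          obtain ⟨res, hres, hiff⟩ := hrec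
          exact ⟨res, by simp [pvIter, hstep, hres], hiff⟩

lemma B_iff (n k : Int) : is_ephemeral_alt n k = true ↔ ∃ j, orbit n k j = 1 := by
  unfold is_ephemeral_alt
  have hcard : (ephSet n k).card ≤ ephN n k + 1 := ephSet_card_le n k
  have hpow := ephN_lt_pow n k
  have h4 := ephN2_le_pow n k
  obtain ⟨res, hres, hiff⟩ := stepB_spec n k (2 ^ eExp n k) 0 n n (by omega)
    rfl rfl (fun j hj1 hj2 => absurd hj2 (by omega))
  have hrun : pvRun (eExp n k + 1) 0 (stepB k) (n, n) = some res :=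
    pvRun_eq (eExp n k) 0 (stepB k) (n, n) res (by rw [Nat.zero_add]; exact hres)
  rw [hrun]
  simp only [Option.getD_some]
  exact hiff

-- ===== VERDICT (by name: the statement is the Claim_ definition above) =====
theorem is_ephemeral_spec : Claim_equal_is_ephemeral := by
  intro n k _ _
  unfold Spec_is_ephemeral
  exact Bool.eq_iff_iff.mpr ((A_iff n k).trans (B_iff n k).symm)
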